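-- pv_equiv track=rewrite | github.com/Ashika-hub-tech/dsa-python-practice | GFG/Common Elements Btw Array.py | common_element
-- ===== SOURCE A (Python) =====
-- def sort(arr):
--     n=len(arr)
--     for i in range(n):
--         for j in range(i+1,n):
--             if arr[j]<arr[i]:
--                 arr[i],arr[j]=arr[j],arr[i]
--     return arr
--
-- def common_element(arr1,arr2,arr3):
--     arr1=sort(arr1)
--     arr2=sort(arr2)
--     arr3=sort(arr3)
--     i=j=k=0
--     result=[]
--     n1=len(arr1)
--     n2=len(arr2)
--     n3=len(arr3)
--     while i<n1 and j<n2 and k<n3: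
--         if(arr1[i]==arr2[j]==arr3[k]):
--             if not result or result[-1] != arr1[i]:
--                 result.append(arr1[i])
--             i+=1
--             j+=1
--             k+=1
--         elif arr1[i]<arr2[j]:
--             i+=1
--         elif arr2[j]<arr3[k]:
--             j+=1
--         else:
--             k+=1
--
--     if not result:
--             return [-1]
--     return result
-- ===== SOURCE B (Python) =====
-- def common_element(arr1, arr2, arr3):
--     # Note: unlike A, this does not sort the argument lists in place
--     # (the equivalence claimed is about the return value only).
--     common = sorted(set(arr1) & set(arr2) & set(arr3))
--     return common if common else [-1]
-- ===== Notes on version B (the rewrite author's own statement) =====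
-- stated objective: faster
-- what changed: Replaced the hand-written O(n^2) exchange sort plus three-pointer merge by a direct set intersection of the three lists followed by one library sort; A's in-place mutation of its arguments is not reproduced (return value equivalence only).
import Mathlib
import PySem

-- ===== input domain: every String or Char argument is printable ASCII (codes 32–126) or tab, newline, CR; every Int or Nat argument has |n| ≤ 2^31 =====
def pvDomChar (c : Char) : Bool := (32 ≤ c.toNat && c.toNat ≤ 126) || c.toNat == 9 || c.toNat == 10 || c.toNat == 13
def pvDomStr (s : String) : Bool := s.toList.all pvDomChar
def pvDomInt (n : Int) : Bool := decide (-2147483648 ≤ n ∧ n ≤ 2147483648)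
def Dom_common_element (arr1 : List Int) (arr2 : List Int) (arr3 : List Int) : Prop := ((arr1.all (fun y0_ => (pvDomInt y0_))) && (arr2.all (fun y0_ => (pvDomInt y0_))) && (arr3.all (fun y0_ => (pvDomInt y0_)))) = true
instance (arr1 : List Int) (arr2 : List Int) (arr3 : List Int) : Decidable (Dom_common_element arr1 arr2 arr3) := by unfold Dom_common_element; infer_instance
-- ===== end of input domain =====

-- B replaces A's O(n^2) in-place exchange sorts + three-pointer merge by a set intersection
-- followed by one library sort; equivalence is about the RETURN value only (A sorts its
-- argument lists in place, B does not mutate them).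

-- ===== PORT A =====

-- one inner-loop step of A's sort: 'if arr[j] < arr[i]: arr[i], arr[j] = arr[j], arr[i]'
-- (indices produced by the ranges are always in range, so getD/set are exact here)
def pvSwapStep (i : Nat) (a : List Int) (j : Nat) : List Int :=
  if a.getD j 0 < a.getD i 0 then (a.set i (a.getD j 0)).set j (a.getD i 0) else a

-- A's helper 'sort': for i in range(n): for j in range(i+1, n): …
def pvSortA (arr : List Int) : List Int :=
  let n := arr.length
  (List.range n).foldl (fun a i => (List.range' (i + 1) (n - (i + 1))).foldl (pvSwapStep i) a) arr

-- A's while-loop with indices i, j, k and the running 'result' list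
def pvLoopA (a1 a2 a3 : List Int) (i j k : Nat) (result : List Int) : List Int :=
  if h : i < a1.length ∧ j < a2.length ∧ k < a3.length then
    let x := a1.getD i 0
    let y := a2.getD j 0
    let z := a3.getD k 0
    if x = y ∧ y = z then
      pvLoopA a1 a2 a3 (i + 1) (j + 1) (k + 1)
        (if result = [] ∨ result.getLast? ≠ some x then result ++ [x] else result)
    else if x < y then pvLoopA a1 a2 a3 (i + 1) j k result
    else if y < z then pvLoopA a1 a2 a3 i (j + 1) k result
    else pvLoopA a1 a2 a3 i j (k + 1) result
  else result
termination_by (a1.length - i) + (a2.length - j) + (a3.length - k)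
decreasing_by all_goals omega

def common_element (arr1 : List Int) (arr2 : List Int) (arr3 : List Int) : List Int :=
  let a1 := pvSortA arr1
  let a2 := pvSortA arr2
  let a3 := pvSortA arr3
  let result := pvLoopA a1 a2 a3 0 0 0 []
  if result = [] then [-1] else result

-- ===== PORT B =====
def common_element_alt (arr1 : List Int) (arr2 : List Int) (arr3 : List Int) : List Int :=
  let common := PySem.List.sorted
    (PySem.Set.inter (PySem.Set.inter (PySem.Set.ofList arr1) (PySem.Set.ofList arr2)) (PySem.Set.ofList arr3))
    (fun x => x) false
  if common = [] then [-1] else common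

-- ===== PRECONDITION & SPEC =====
def Spec_common_element (arr1 : List Int) (arr2 : List Int) (arr3 : List Int) (out : List Int) : Prop := out = common_element_alt arr1 arr2 arr3
instance (arr1 : List Int) (arr2 : List Int) (arr3 : List Int) (out : List Int) : Decidable (Spec_common_element arr1 arr2 arr3 out) := by unfold Spec_common_element; infer_instance

-- ===== CLAIM (what is proved, stated in full; the proofs are below) =====
def Claim_equal_common_element : Prop := ∀ (arr1 : List Int) (arr2 : List Int) (arr3 : List Int), Dom_common_element arr1 arr2 arr3 → Spec_common_element arr1 arr2 arr3 (common_element arr1 arr2 arr3)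

-- ===== LEMMAS AND PROOFS =====

-- selection of the minimum: scanning xs with current value v, (selMin v xs) is
-- (the minimum of v::xs, the other elements in the order A's inner loop leaves them)
def selMin (v : Int) (xs : List Int) : Int × List Int :=
  match xs with
  | [] => (v, [])
  | x :: xs => ((selMin (min v x) xs).1, max v x :: (selMin (min v x) xs).2)

lemma selMin_len (v : Int) (xs : List Int) : (selMin v xs).2.length = xs.length := by
  induction xs generalizing v with
  | nil => rfl
  | cons x xs ih => simp [selMin, ih]

-- selection sort: what A's double loop computes
def selSort (l : List Int) : List Int :=
  match l with
  | [] => []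
  | v :: xs => (selMin v xs).1 :: selSort (selMin v xs).2
termination_by l.length
decreasing_by simp [selMin_len]

lemma getD_append_len (pre : List Int) (v : Int) (l : List Int) :
    (pre ++ v :: l).getD pre.length 0 = v := by
  simp

lemma set_append_len (pre : List Int) (v w : Int) (l : List Int) :
    (pre ++ v :: l).set pre.length w = pre ++ w :: l := by
  simp

-- the inner loop, started at absolute position (pre.length + mid.length + 1), selects the
-- minimum of v :: xs into position pre.length
lemma inner_eq (pre : List Int) : ∀ (xs : List Int) (v : Int) (mid : List Int),
    (List.range' (pre.length + mid.length + 1) xs.length).foldl (pvSwapStep pre.length)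
      (pre ++ v :: (mid ++ xs))
      = pre ++ (selMin v xs).1 :: (mid ++ (selMin v xs).2) := by
  intro xs
  induction xs with
  | nil => intro v mid; simp [selMin]
  | cons x xs ih =>
    intro v mid
    simp only [List.length_cons]
    rw [List.range'_succ, List.foldl_cons]
    have hstep : pvSwapStep pre.length (pre ++ v :: (mid ++ x :: xs)) (pre.length + mid.length + 1)
        = pre ++ min v x :: (mid ++ max v x :: xs) := by
      have hj : (pre ++ v :: (mid ++ x :: xs)).getD (pre.length + mid.length + 1) 0 = x := by
        have hl : pre.length + mid.length + 1 = (pre ++ v :: mid).length := by simp; omega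
        rw [hl, show pre ++ v :: (mid ++ x :: xs) = (pre ++ v :: mid) ++ x :: xs by simp]
        exact getD_append_len _ _ _
      have hi : (pre ++ v :: (mid ++ x :: xs)).getD pre.length 0 = v :=
        getD_append_len pre v (mid ++ x :: xs)
      unfold pvSwapStep
      rw [hj, hi]
      by_cases hlt : x < v
      · have hset1 : (pre ++ v :: (mid ++ x :: xs)).set pre.length x
            = pre ++ x :: (mid ++ x :: xs) := set_append_len pre v x (mid ++ x :: xs)
        have hset2 : (pre ++ x :: (mid ++ x :: xs)).set (pre.length + mid.length + 1) v
            = pre ++ x :: (mid ++ v :: xs) := by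
          have hl : pre.length + mid.length + 1 = (pre ++ x :: mid).length := by simp; omega
          rw [hl, show pre ++ x :: (mid ++ x :: xs) = (pre ++ x :: mid) ++ x :: xs by simp,
            set_append_len]
          simp
        simp only [if_pos hlt, hset1, hset2]
        rw [min_eq_right (le_of_lt hlt), max_eq_left (le_of_lt hlt)]
      · simp only [if_neg hlt]
        push Not at hlt
        rw [min_eq_left hlt, max_eq_right hlt]
    rw [hstep]
    have := ih (min v x) (mid ++ [max v x])
    simpa [selMin, List.append_assoc, Nat.add_assoc, Nat.add_comm, Nat.add_left_comm] using this

-- the outer loop from position pre.length sorts the suffix by selection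
lemma outer_eq (n : Nat) : ∀ (s pre : List Int), pre.length + s.length = n →
    (List.range' pre.length s.length).foldl
      (fun a i => (List.range' (i + 1) (n - (i + 1))).foldl (pvSwapStep i) a) (pre ++ s)
      = pre ++ selSort s := by
  intro s
  induction s using selSort.induct with
  | case1 => intro pre _; simp [selSort]
  | case2 v xs ih =>
    intro pre hn
    simp only [List.length_cons]
    rw [List.range'_succ, List.foldl_cons]
    have hcnt : n - (pre.length + 1) = xs.length := by
      simp at hn; omega
    have hinner := inner_eq pre xs v []
    simp only [List.length_nil, Nat.add_zero, List.nil_append] at hinner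
    rw [hcnt, hinner]
    have := ih (pre ++ [(selMin v xs).1]) (by simp [selMin_len] at hn ⊢; omega)
    simpa [selSort, selMin_len, List.append_assoc] using this

lemma sortA_eq_selSort (l : List Int) : pvSortA l = selSort l := by
  have := outer_eq l.length l [] (by simp)
  simpa [pvSortA, List.range_eq_range'] using this

lemma selMin_perm (v : Int) (xs : List Int) :
    ((selMin v xs).1 :: (selMin v xs).2).Perm (v :: xs) := by
  induction xs generalizing v with
  | nil => simp [selMin]
  | cons x xs ih =>
    simp only [selMin]
    have h1 : ((selMin (min v x) xs).1 :: max v x :: (selMin (min v x) xs).2).Perm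
        (max v x :: (selMin (min v x) xs).1 :: (selMin (min v x) xs).2) :=
      List.Perm.swap _ _ _
    have h2 := (ih (min v x)).cons (max v x)
    have h3 : (max v x :: min v x :: xs).Perm (v :: x :: xs) := by
      rcases le_total v x with h | h
      · rw [max_eq_right h, min_eq_left h]; exact List.Perm.swap _ _ _
      · rw [max_eq_left h, min_eq_right h]
    exact h1.trans (h2.trans h3)

lemma selMin_le (v : Int) (xs : List Int) :
    (selMin v xs).1 ≤ v ∧ ∀ w ∈ xs, (selMin v xs).1 ≤ w := by
  induction xs generalizing v with
  | nil => simp [selMin]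
  | cons x xs ih =>
    simp only [selMin]
    obtain ⟨h1, h2⟩ := ih (min v x)
    refine ⟨le_trans h1 (min_le_left _ _), ?_⟩
    intro w hw
    rcases List.mem_cons.mp hw with h | h
    · subst h; exact le_trans h1 (min_le_right _ _)
    · exact h2 w h

lemma selSort_perm (l : List Int) : (selSort l).Perm l := by
  induction l using selSort.induct with
  | case1 => simp [selSort]
  | case2 v xs ih =>
    rw [selSort]
    exact (ih.cons _).trans (selMin_perm v xs)

lemma selSort_sorted (l : List Int) : (selSort l).Pairwise (· ≤ ·) := by
  induction l using selSort.induct with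
  | case1 => simp [selSort]
  | case2 v xs ih =>
    rw [selSort]
    refine List.pairwise_cons.mpr ⟨?_, ih⟩
    intro w hw
    have hw' : w ∈ (selMin v xs).2 := (selSort_perm _).mem_iff.mp hw
    obtain ⟨h1, h2⟩ := selMin_le v xs
    have hw'' : w ∈ v :: xs := (selMin_perm v xs).mem_iff.mp (List.mem_cons_of_mem _ hw')
    rcases List.mem_cons.mp hw'' with h | h
    · exact h ▸ h1
    · exact h2 w h

-- structural form of A's while loop, on the suffixes of the three lists
def walk : List Int → List Int → List Int → List Int → List Int
  | x :: xs, y :: ys, z :: zs, res =>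
    if x = y ∧ y = z then
      walk xs ys zs (if res = [] ∨ res.getLast? ≠ some x then res ++ [x] else res)
    else if x < y then walk xs (y :: ys) (z :: zs) res
    else if y < z then walk (x :: xs) ys (z :: zs) res
    else walk (x :: xs) (y :: ys) zs res
  | _, _, _, res => res

lemma drop_eq_getD_cons (l : List Int) (i : Nat) (h : i < l.length) :
    l.drop i = l.getD i 0 :: l.drop (i + 1) := by
  rw [List.getD_eq_getElem l 0 h, List.drop_eq_getElem_cons h]

lemma walk_nil (s1 s2 s3 res : List Int) (h : s1 = [] ∨ s2 = [] ∨ s3 = []) :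
    walk s1 s2 s3 res = res := by
  rcases s1 with _ | ⟨x, xs⟩ <;> rcases s2 with _ | ⟨y, ys⟩ <;> rcases s3 with _ | ⟨z, zs⟩ <;>
    simp [walk] at h ⊢

lemma loop_eq_walk (a1 a2 a3 : List Int) : ∀ i j k res,
    pvLoopA a1 a2 a3 i j k res = walk (a1.drop i) (a2.drop j) (a3.drop k) res := by
  intro i j k res
  induction i, j, k, res using pvLoopA.induct a1 a2 a3 with
  | case1 i j k res h x y z heq ih =>
    obtain ⟨h1, h2, h3⟩ := h
    rw [dite_eq_ite] at ih
    rw [pvLoopA, dif_pos (⟨h1, h2, h3⟩ : i < a1.length ∧ j < a2.length ∧ k < a3.length),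
      if_pos heq]
    rw [ih, drop_eq_getD_cons a1 i h1, drop_eq_getD_cons a2 j h2, drop_eq_getD_cons a3 k h3,
      walk, if_pos heq]
  | case2 i j k res h x y z heq hlt ih =>
    obtain ⟨h1, h2, h3⟩ := h
    rw [pvLoopA, dif_pos (⟨h1, h2, h3⟩ : i < a1.length ∧ j < a2.length ∧ k < a3.length),
      if_neg heq, if_pos hlt]
    rw [ih, drop_eq_getD_cons a1 i h1, drop_eq_getD_cons a2 j h2, drop_eq_getD_cons a3 k h3,
      walk, if_neg heq, if_pos hlt]
  | case3 i j k res h x y z heq hlt hlt2 ih =>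
    obtain ⟨h1, h2, h3⟩ := h
    rw [pvLoopA, dif_pos (⟨h1, h2, h3⟩ : i < a1.length ∧ j < a2.length ∧ k < a3.length),
      if_neg heq, if_neg hlt, if_pos hlt2]
    rw [ih, drop_eq_getD_cons a1 i h1, drop_eq_getD_cons a2 j h2, drop_eq_getD_cons a3 k h3,
      walk, if_neg heq, if_neg hlt, if_pos hlt2]
  | case4 i j k res h x y z heq hlt hlt2 ih =>
    obtain ⟨h1, h2, h3⟩ := h
    rw [pvLoopA, dif_pos (⟨h1, h2, h3⟩ : i < a1.length ∧ j < a2.length ∧ k < a3.length),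
      if_neg heq, if_neg hlt, if_neg hlt2]
    rw [ih, drop_eq_getD_cons a1 i h1, drop_eq_getD_cons a2 j h2, drop_eq_getD_cons a3 k h3,
      walk, if_neg heq, if_neg hlt, if_neg hlt2]
  | case5 i j k res h =>
    rw [pvLoopA]
    simp only [dif_neg h]
    rw [walk_nil]
    push Not at h
    by_cases hc1 : i < a1.length
    · by_cases hc2 : j < a2.length
      · right; right; simp [List.drop_eq_nil_iff]; omega
      · right; left; simp [List.drop_eq_nil_iff]; omega
    · left; simp [List.drop_eq_nil_iff]; omega

lemma mem_le_getLast : ∀ {res : List Int}, res.Pairwise (· < ·) → ∀ {a : Int}, a ∈ res →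
    ∃ r, res.getLast? = some r ∧ a ≤ r := by
  intro res
  induction res with
  | nil => intro _ a ha; simp at ha
  | cons b t ih =>
    intro h a ha
    obtain ⟨hb, ht⟩ := List.pairwise_cons.mp h
    rcases t with _ | ⟨c, t'⟩
    · simp at ha
      exact ⟨b, rfl, le_of_eq ha⟩
    · rw [List.getLast?_cons_cons]
      rcases List.mem_cons.mp ha with h' | h'
      · obtain ⟨r, hr, hcr⟩ := ih ht (show c ∈ c :: t' by simp)
        exact ⟨r, hr, h' ▸ le_of_lt (lt_of_lt_of_le (hb c (by simp)) hcr)⟩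
      · obtain ⟨r, hr, har⟩ := ih ht h'
        exact ⟨r, hr, har⟩

-- the main loop invariant: on weakly sorted inputs, with res strictly increasing and every
-- element of res below every remaining element, the loop returns res extended by the strictly
-- increasing list of values common to the three suffixes
lemma walk_spec : ∀ s1 s2 s3 res : List Int,
    s1.Pairwise (· ≤ ·) → s2.Pairwise (· ≤ ·) → s3.Pairwise (· ≤ ·) →
    res.Pairwise (· < ·) →
    (∀ a ∈ res, ∀ w ∈ s1, a ≤ w) → (∀ a ∈ res, ∀ w ∈ s2, a ≤ w) →
    (∀ a ∈ res, ∀ w ∈ s3, a ≤ w) →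
    (walk s1 s2 s3 res).Pairwise (· < ·) ∧
      (∀ v, v ∈ walk s1 s2 s3 res ↔ v ∈ res ∨ (v ∈ s1 ∧ v ∈ s2 ∧ v ∈ s3)) := by
  intro s1 s2 s3 res
  induction s1, s2, s3, res using walk.induct with
  | case1 x xs y ys z zs res heq ih =>
    intro hs1 hs2 hs3 hres hb1 hb2 hb3
    obtain ⟨hxy, hyz⟩ := heq
    subst hxy; subst hyz
    rw [walk, if_pos ⟨rfl, rfl⟩]
    obtain ⟨hx1, hs1'⟩ := List.pairwise_cons.mp hs1
    obtain ⟨hx2, hs2'⟩ := List.pairwise_cons.mp hs2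
    obtain ⟨hx3, hs3'⟩ := List.pairwise_cons.mp hs3
    by_cases hc : res = [] ∨ res.getLast? ≠ some x
    · rw [if_pos hc]
      have hlt : ∀ a ∈ res, a < x := by
        intro a ha
        have hle : a ≤ x := hb1 a ha x (List.mem_cons_self)
        rcases lt_or_eq_of_le hle with h | h
        · exact h
        · exfalso
          subst h
          obtain ⟨r, hr, har⟩ := mem_le_getLast hres ha
          have hrres := List.mem_of_getLast? hr
          have : r ≤ a := hb1 r hrres a (List.mem_cons_self)
          have : r = a := le_antisymm this har
          subst this
          rcases hc with hc | hc
          · simp [hc] at ha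
          · exact hc hr
      have hres' : (res ++ [x]).Pairwise (· < ·) := by
        rw [List.pairwise_append]
        exact ⟨hres, List.pairwise_singleton _ _, by simpa using hlt⟩
      have hbnd : ∀ a ∈ res ++ [x], ∀ w ∈ xs, a ≤ w := by
        intro a ha w hw
        rcases List.mem_append.mp ha with h | h
        · exact hb1 a h w (List.mem_cons_of_mem _ hw)
        · simp at h; subst h; exact hx1 w hw
      have hbnd2 : ∀ a ∈ res ++ [x], ∀ w ∈ ys, a ≤ w := by
        intro a ha w hw
        rcases List.mem_append.mp ha with h | h
        · exact hb2 a h w (List.mem_cons_of_mem _ hw)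
        · simp at h; subst h; exact hx2 w hw
      have hbnd3 : ∀ a ∈ res ++ [x], ∀ w ∈ zs, a ≤ w := by
        intro a ha w hw
        rcases List.mem_append.mp ha with h | h
        · exact hb3 a h w (List.mem_cons_of_mem _ hw)
        · simp at h; subst h; exact hx3 w hw
      rw [dif_pos hc] at ih
      obtain ⟨hp, hm⟩ := ih hs1' hs2' hs3' hres' hbnd hbnd2 hbnd3
      refine ⟨hp, ?_⟩
      intro v
      rw [hm v]
      constructor
      · rintro (hv | ⟨hv1, hv2, hv3⟩)
        · rcases List.mem_append.mp hv with h | h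
          · exact Or.inl h
          · simp at h; subst h
            exact Or.inr ⟨List.mem_cons_self, List.mem_cons_self, List.mem_cons_self⟩
        · exact Or.inr ⟨List.mem_cons_of_mem _ hv1, List.mem_cons_of_mem _ hv2,
            List.mem_cons_of_mem _ hv3⟩
      · rintro (hv | ⟨hv1, hv2, hv3⟩)
        · exact Or.inl (List.mem_append.mpr (Or.inl hv))
        · by_cases hvx : v = x
          · subst hvx; exact Or.inl (by simp)
          · exact Or.inr ⟨(List.mem_cons.mp hv1).resolve_left hvx,
              (List.mem_cons.mp hv2).resolve_left hvx, (List.mem_cons.mp hv3).resolve_left hvx⟩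
    · rw [if_neg hc]
      rw [dif_neg hc] at ih
      push Not at hc
      obtain ⟨hne, hlast⟩ := hc
      have hxres : x ∈ res := List.mem_of_getLast? hlast
      have hbnd : ∀ a ∈ res, ∀ w ∈ xs, a ≤ w := fun a ha w hw =>
        hb1 a ha w (List.mem_cons_of_mem _ hw)
      have hbnd2 : ∀ a ∈ res, ∀ w ∈ ys, a ≤ w := fun a ha w hw =>
        hb2 a ha w (List.mem_cons_of_mem _ hw)
      have hbnd3 : ∀ a ∈ res, ∀ w ∈ zs, a ≤ w := fun a ha w hw =>
        hb3 a ha w (List.mem_cons_of_mem _ hw)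
      obtain ⟨hp, hm⟩ := ih hs1' hs2' hs3' hres hbnd hbnd2 hbnd3
      refine ⟨hp, ?_⟩
      intro v
      rw [hm v]
      constructor
      · rintro (hv | ⟨hv1, hv2, hv3⟩)
        · exact Or.inl hv
        · exact Or.inr ⟨List.mem_cons_of_mem _ hv1, List.mem_cons_of_mem _ hv2,
            List.mem_cons_of_mem _ hv3⟩
      · rintro (hv | ⟨hv1, hv2, hv3⟩)
        · exact Or.inl hv
        · by_cases hvx : v = x
          · subst hvx; exact Or.inl hxres
          · exact Or.inr ⟨(List.mem_cons.mp hv1).resolve_left hvx,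
              (List.mem_cons.mp hv2).resolve_left hvx, (List.mem_cons.mp hv3).resolve_left hvx⟩
  | case2 x xs y ys z zs res heq hlt ih =>
    intro hs1 hs2 hs3 hres hb1 hb2 hb3
    rw [walk, if_neg heq, if_pos hlt]
    obtain ⟨hx1, hs1'⟩ := List.pairwise_cons.mp hs1
    have hbnd : ∀ a ∈ res, ∀ w ∈ xs, a ≤ w := fun a ha w hw =>
      hb1 a ha w (List.mem_cons_of_mem _ hw)
    obtain ⟨hp, hm⟩ := ih hs1' hs2 hs3 hres hbnd hb2 hb3
    refine ⟨hp, ?_⟩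
    intro v
    rw [hm v]
    have hxny : x ∉ y :: ys := by
      intro hmem
      obtain ⟨hy2, _⟩ := List.pairwise_cons.mp hs2
      rcases List.mem_cons.mp hmem with h | h
      · exact absurd h (ne_of_lt hlt)
      · exact absurd hlt (not_lt.mpr (hy2 x h))
    constructor
    · rintro (hv | ⟨hv1, hv2, hv3⟩)
      · exact Or.inl hv
      · exact Or.inr ⟨List.mem_cons_of_mem _ hv1, hv2, hv3⟩
    · rintro (hv | ⟨hv1, hv2, hv3⟩)
      · exact Or.inl hv
      · refine Or.inr ⟨?_, hv2, hv3⟩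
        rcases List.mem_cons.mp hv1 with h | h
        · subst h; exact absurd hv2 hxny
        · exact h
  | case3 x xs y ys z zs res heq hlt hlt2 ih =>
    intro hs1 hs2 hs3 hres hb1 hb2 hb3
    rw [walk, if_neg heq, if_neg hlt, if_pos hlt2]
    obtain ⟨hy2, hs2'⟩ := List.pairwise_cons.mp hs2
    have hbnd : ∀ a ∈ res, ∀ w ∈ ys, a ≤ w := fun a ha w hw =>
      hb2 a ha w (List.mem_cons_of_mem _ hw)
    obtain ⟨hp, hm⟩ := ih hs1 hs2' hs3 hres hb1 hbnd hb3
    refine ⟨hp, ?_⟩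
    intro v
    rw [hm v]
    have hynz : y ∉ z :: zs := by
      intro hmem
      obtain ⟨hz3, _⟩ := List.pairwise_cons.mp hs3
      rcases List.mem_cons.mp hmem with h | h
      · exact absurd h (ne_of_lt hlt2)
      · exact absurd hlt2 (not_lt.mpr (hz3 y h))
    constructor
    · rintro (hv | ⟨hv1, hv2, hv3⟩)
      · exact Or.inl hv
      · exact Or.inr ⟨hv1, List.mem_cons_of_mem _ hv2, hv3⟩
    · rintro (hv | ⟨hv1, hv2, hv3⟩)
      · exact Or.inl hv
      · refine Or.inr ⟨hv1, ?_, hv3⟩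
        rcases List.mem_cons.mp hv2 with h | h
        · subst h; exact absurd hv3 hynz
        · exact h
  | case4 x xs y ys z zs res heq hlt hlt2 ih =>
    intro hs1 hs2 hs3 hres hb1 hb2 hb3
    rw [walk, if_neg heq, if_neg hlt, if_neg hlt2]
    obtain ⟨hz3, hs3'⟩ := List.pairwise_cons.mp hs3
    have hbnd : ∀ a ∈ res, ∀ w ∈ zs, a ≤ w := fun a ha w hw =>
      hb3 a ha w (List.mem_cons_of_mem _ hw)
    obtain ⟨hp, hm⟩ := ih hs1 hs2 hs3' hres hb1 hb2 hbnd
    refine ⟨hp, ?_⟩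
    intro v
    rw [hm v]
    have hzn1 : z ∉ x :: xs := by
      intro hmem
      have hyx : y ≤ x := not_lt.mp hlt
      have hzy : z ≤ y := not_lt.mp hlt2
      obtain ⟨hx1, _⟩ := List.pairwise_cons.mp hs1
      have hxz : x ≤ z := by
        rcases List.mem_cons.mp hmem with h | h
        · exact le_of_eq h.symm
        · exact hx1 z h
      have hxy : x = y := le_antisymm (le_trans (le_trans hxz hzy) (le_refl y))
        (by omega)
      exact heq ⟨hxy, by omega⟩
    constructor
    · rintro (hv | ⟨hv1, hv2, hv3⟩)
      · exact Or.inl hv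
      · exact Or.inr ⟨hv1, hv2, List.mem_cons_of_mem _ hv3⟩
    · rintro (hv | ⟨hv1, hv2, hv3⟩)
      · exact Or.inl hv
      · refine Or.inr ⟨hv1, hv2, ?_⟩
        rcases List.mem_cons.mp hv3 with h | h
        · subst h; exact absurd hv1 hzn1
        · exact h
  | case5 s1 s2 s3 res h =>
    intro _ _ _ hres _ _ _
    have hnil : s1 = [] ∨ s2 = [] ∨ s3 = [] := by
      rcases s1 with _ | ⟨x, xs⟩
      · exact Or.inl rfl
      rcases s2 with _ | ⟨y, ys⟩
      · exact Or.inr (Or.inl rfl)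
      rcases s3 with _ | ⟨z, zs⟩
      · exact Or.inr (Or.inr rfl)
      exact absurd (h x xs y ys z zs rfl rfl rfl) not_false
    rw [walk_nil _ _ _ _ hnil]
    refine ⟨hres, ?_⟩
    intro v
    constructor
    · exact Or.inl
    · rintro (hv | ⟨hv1, hv2, hv3⟩)
      · exact hv
      · rcases hnil with h' | h' | h' <;> subst h' <;> simp_all

-- ===== VERDICT (by name: the statement is the Claim_ definition above) =====
theorem common_element_spec : Claim_equal_common_element := by
  intro arr1 arr2 arr3 _
  unfold Spec_common_element common_element common_element_alt
  simp only []
  rw [loop_eq_walk]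
  simp only [List.drop_zero]
  rw [sortA_eq_selSort, sortA_eq_selSort, sortA_eq_selSort]
  obtain ⟨hp, hm⟩ := walk_spec (selSort arr1) (selSort arr2) (selSort arr3) []
    (selSort_sorted _) (selSort_sorted _) (selSort_sorted _) (by simp) (by simp) (by simp)
    (by simp)
  have hnodupW : (walk (selSort arr1) (selSort arr2) (selSort arr3) []).Nodup :=
    hp.imp ne_of_lt
  have hnodupI : (PySem.Set.inter (PySem.Set.inter (PySem.Set.ofList arr1)
      (PySem.Set.ofList arr2)) (PySem.Set.ofList arr3)).Nodup :=
    PySem.Set.nodup_inter _ _ (PySem.Set.nodup_inter _ _ (PySem.Set.nodup_ofList arr1))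
  have hperm : (walk (selSort arr1) (selSort arr2) (selSort arr3) []).Perm
      (PySem.Set.inter (PySem.Set.inter (PySem.Set.ofList arr1) (PySem.Set.ofList arr2))
        (PySem.Set.ofList arr3)) := by
    rw [List.perm_ext_iff_of_nodup hnodupW hnodupI]
    intro v
    rw [hm v]
    simp [PySem.Set.mem_inter, PySem.Set.mem_ofList, (selSort_perm arr1).mem_iff,
      (selSort_perm arr2).mem_iff, (selSort_perm arr3).mem_iff, and_assoc]
  have hsorted := PySem.List.sorted_eq_of_perm_of_pairwise_lt _ _ (fun x => x) hperm hp
  rw [hsorted]
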